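-- pv_equiv track=rewrite | github.com/reflex-dev/reflex | reflex/minify.py | int_to_minified_name
-- ===== SOURCE A (Python) =====
-- _MINIFY_CHARS = "abcdefghijklmnopqrstuvwxyzABCDEFGHIJKLMNOPQRSTUVWXYZ$_"
--
-- _MINIFY_BASE = len(_MINIFY_CHARS)  # 54
--
-- def int_to_minified_name(id_: int) -> str:
--     """Convert integer ID to minified name using base-54 encoding.
--
--     Args:
--         id_: The integer ID to convert.
--
--     Returns:
--         A minified string representation.
--
--     Raises:
--         ValueError: If id_ is negative.
--     """
--     if id_ < 0:
--         msg = f"ID must be non-negative, got {id_}"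
--         raise ValueError(msg)
--
--     # Special case: 0 maps to 'a'
--     if id_ == 0:
--         return _MINIFY_CHARS[0]
--
--     result = []
--     num = id_
--     while num > 0:
--         result.append(_MINIFY_CHARS[num % _MINIFY_BASE])
--         num //= _MINIFY_BASE
--
--     return "".join(reversed(result))
-- ===== SOURCE B (Python) =====
-- _MINIFY_CHARS = "abcdefghijklmnopqrstuvwxyzABCDEFGHIJKLMNOPQRSTUVWXYZ$_"
--
-- _MINIFY_BASE = len(_MINIFY_CHARS)  # 54
--
--
-- def int_to_minified_name(id_: int) -> str:
--     """Convert integer ID to minified name using base-54 encoding.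
--
--     Length-first algorithm: first find k, the number of base-54 digits of
--     id_, by scanning powers of the base; then write the digits directly
--     most-significant-first as (id_ // base**i) % base for i = k-1 .. 0.
--     No list accumulator and no reversal.
--     """
--     if id_ < 0:
--         msg = f"ID must be non-negative, got {id_}"
--         raise ValueError(msg)
--     if id_ == 0:
--         return _MINIFY_CHARS[0]
--
--     p = 1
--     k = 0
--     while p <= id_:
--         p *= _MINIFY_BASE
--         k += 1
--
--     out = ""
--     for i in range(k - 1, -1, -1):
--         out += _MINIFY_CHARS[(id_ // _MINIFY_BASE**i) % _MINIFY_BASE]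
--     return out
-- ===== Notes on version B (the rewrite author's own statement) =====
-- stated objective: alternative
-- what changed: Replaces the append-digits-then-reverse loop with a length-first algorithm: a power-of-54 scan first determines the digit count k, then each digit is written directly most-significant-first as (id_ // 54**i) % 54, so no digit list is accumulated and no reversal is performed.
import Mathlib
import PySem

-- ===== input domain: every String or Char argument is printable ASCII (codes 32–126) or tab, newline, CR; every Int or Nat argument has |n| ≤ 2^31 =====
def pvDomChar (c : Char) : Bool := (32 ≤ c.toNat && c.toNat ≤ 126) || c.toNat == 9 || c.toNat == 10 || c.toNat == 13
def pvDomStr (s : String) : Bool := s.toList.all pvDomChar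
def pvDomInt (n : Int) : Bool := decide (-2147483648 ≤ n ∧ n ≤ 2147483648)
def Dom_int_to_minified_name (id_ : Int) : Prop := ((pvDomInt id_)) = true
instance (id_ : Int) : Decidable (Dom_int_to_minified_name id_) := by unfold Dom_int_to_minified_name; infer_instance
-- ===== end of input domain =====

-- B is a length-first algorithm: it first finds the digit count k by scanning
-- powers of 54, then writes each digit directly as (id_ // 54**i) % 54 for
-- i = k-1 .. 0, so no digit list is accumulated and no reversal is needed
-- (objective: alternative; equal on all non-negative inputs).

-- _MINIFY_CHARS (shared module constant), as a list of characters
def pvMinifyChars : List Char :=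
  "abcdefghijklmnopqrstuvwxyzABCDEFGHIJKLMNOPQRSTUVWXYZ$_".toList

-- quotient shrinks: used by A's loop for termination
theorem pvDiv54_toNat_lt (num : Int) (h : 0 < num) :
    (PySem.Int.floordiv num 54).toNat < num.toNat := by
  rw [PySem.Int.floordiv_eq_ediv_of_pos (by norm_num)]
  have h1 : num / 54 < num := by
    rw [Int.ediv_lt_iff_lt_mul (by norm_num)]; nlinarith
  have h2 : 0 ≤ num / 54 := Int.ediv_nonneg (le_of_lt h) (by norm_num)
  omega

-- ===== PORT A =====
-- A's while loop: result.append(chars[num % 54]); num //= 54.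
-- The index num % 54 is always in range, so pyGetD's default is never used.
def pvLoopA (num : Int) (acc : List Char) : List Char :=
  if h : 0 < num then
    pvLoopA (PySem.Int.floordiv num 54)
      (acc ++ [PySem.List.pyGetD pvMinifyChars (PySem.Int.mod num 54) ' '])
  else acc
termination_by num.toNat
decreasing_by exact pvDiv54_toNat_lt num h

def int_to_minified_name (id_ : Int) : String :=
  -- 'if id_ < 0: raise ValueError' is excluded by Pre_int_to_minified_name
  if id_ = 0 then String.ofList [PySem.List.pyGetD pvMinifyChars 0 ' ']
  else String.ofList ((pvLoopA id_ []).reverse)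

-- ===== PORT B =====
-- B's first loop: p = 1; k = 0; while p <= id_: p *= 54; k += 1.
-- (The 0 < p conjunct only makes termination evident; p starts at 1 and grows.)
def pvPowLoopB (id_ p : Int) (k : Nat) : Nat :=
  if h : 0 < p ∧ p ≤ id_ then pvPowLoopB id_ (p * 54) (k + 1) else k
termination_by (id_ + 1 - p).toNat
decreasing_by
  have : p + 53 ≤ p * 54 := by nlinarith [h.1]
  omega

-- B's second loop: for i in range(k-1, -1, -1): out += chars[(id_ // 54**i) % 54]
def int_to_minified_name_alt (id_ : Int) : String :=
  if id_ = 0 then String.ofList [PySem.List.pyGetD pvMinifyChars 0 ' ']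
  else
    let k : Nat := pvPowLoopB id_ 1 0
    String.ofList ((PySem.List.pyRange ((k : Int) - 1) (-1) (-1)).foldl
      (fun acc i => acc ++ [PySem.List.pyGetD pvMinifyChars
        (PySem.Int.mod (PySem.Int.floordiv id_ (54 ^ i.toNat)) 54) ' ']) [])

-- ===== PRECONDITION & SPEC =====
-- A raises ValueError on negative id_; Pre_ excludes exactly those inputs.
def Pre_int_to_minified_name (id_ : Int) : Prop := 0 ≤ id_
instance (id_ : Int) : Decidable (Pre_int_to_minified_name id_) := by
  unfold Pre_int_to_minified_name; infer_instance

def pvWitness_int_to_minified_name : Int := (55)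

def Spec_int_to_minified_name (id_ : Int) (out : String) : Prop := out = int_to_minified_name_alt id_
instance (id_ : Int) (out : String) : Decidable (Spec_int_to_minified_name id_ out) := by unfold Spec_int_to_minified_name; infer_instance

-- ===== CLAIM (what is proved, stated in full; the proofs are below) =====
def Claim_equal_int_to_minified_name : Prop := ∀ (id_ : Int), Dom_int_to_minified_name id_ → Pre_int_to_minified_name id_ → Spec_int_to_minified_name id_ (int_to_minified_name id_)

-- ===== LEMMAS AND PROOFS =====

-- base-54 digit values of n, least-significant first (abstract reference)
def pvDLSD (n : Nat) : List Nat :=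
  if h : n = 0 then [] else (n % 54) :: pvDLSD (n / 54)
decreasing_by exact Nat.div_lt_self (Nat.pos_of_ne_zero h) (by norm_num)

-- A's loop collects exactly the LSD-first digit characters
theorem pvLoopA_eq_dLSD (N : Nat) :
    ∀ (num : Int), num.toNat = N → 0 ≤ num → ∀ (acc : List Char),
      pvLoopA num acc =
        acc ++ (pvDLSD num.toNat).map
          (fun d : Nat => PySem.List.pyGetD pvMinifyChars (d : Int) ' ') := by
  induction N using Nat.strong_induction_on with
  | _ N ih =>
    intro num hn hnn acc
    rw [pvLoopA]
    split_ifs with h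
    · obtain ⟨n, rfl⟩ : ∃ n : Nat, num = (n : Int) := ⟨num.toNat, (Int.toNat_of_nonneg hnn).symm⟩
      simp only [Int.toNat_natCast] at hn ⊢
      have hpos : 0 < n := by exact_mod_cast h
      rw [show ((54 : Int)) = ((54 : Nat) : Int) by norm_num,
        PySem.Int.floordiv_natCast, PySem.Int.mod_natCast]
      rw [ih (n / 54) (by rw [← hn]; exact Nat.div_lt_self hpos (by norm_num))
          ((n / 54 : Nat) : Int) (Int.toNat_natCast _) (Int.natCast_nonneg _) _]
      rw [show pvDLSD n = (n % 54) :: pvDLSD (n / 54) by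
        rw [pvDLSD, dif_neg (by omega)]]
      simp
      refine ⟨?_, ?_⟩
      · rw [show ((n : Int) % 54) = ((n % 54 : Nat) : Int) by omega,
          PySem.List.pyGetD_natCast]
        rfl
      · rw [show ((n : Int) / 54).toNat = n / 54 by omega]
    · have : num.toNat = 0 := by omega
      rw [this, pvDLSD]; simp

-- the power loop returns the exact digit count: id_ < 54^K and 54^(K-1) ≤ id_
theorem pvPowLoopB_spec (N : Nat) :
    ∀ (id_ : Int) (j : Nat), (id_ + 1 - 54 ^ j).toNat = N → 0 < id_ →
      (j = 0 ∨ (54 : Int) ^ (j - 1) ≤ id_) →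
      id_ < (54 : Int) ^ (pvPowLoopB id_ (54 ^ j) j) ∧
        0 < pvPowLoopB id_ (54 ^ j) j ∧
        (54 : Int) ^ (pvPowLoopB id_ (54 ^ j) j - 1) ≤ id_ := by
  induction N using Nat.strong_induction_on with
  | _ N ih =>
    intro id_ j hN hpos hj
    have hp : (0 : Int) < 54 ^ j := by positivity
    rw [pvPowLoopB]
    split_ifs with h
    · have hstep : (54 : Int) ^ j * 54 = 54 ^ (j + 1) := by ring
      rw [hstep]
      refine ih ((id_ + 1 - 54 ^ (j + 1)).toNat) ?_ id_ (j + 1) rfl hpos ?_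
      · have h53 : (54 : Int) ^ j + 53 ≤ 54 ^ (j + 1) := by nlinarith [hp]
        omega
      · right; simpa using h.2
    · push_neg at h
      have hlt : id_ < 54 ^ j := h hp
      rcases hj with rfl | hle
      · simp at hlt; omega
      · have hj0 : 0 < j := by
          by_contra hc
          have : j = 0 := by omega
          subst this; simp at hlt; omega
        exact ⟨hlt, hj0, hle⟩

-- direct MSD indexing reproduces the LSD digit list (read back-to-front)
theorem pvMSD_eq_dLSD :
    ∀ (k n : Nat), 0 < n → n < 54 ^ k → 54 ^ (k - 1) ≤ n →
      (List.range k).map (fun i => n / 54 ^ i % 54) = pvDLSD n := by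
  intro k
  induction k with
  | zero => intro n h1 h2 _; simp at h2; omega
  | succ k ih =>
    intro n h1 h2 h3
    have hD : pvDLSD n = (n % 54) :: pvDLSD (n / 54) := by
      rw [pvDLSD, dif_neg (by omega)]
    rw [List.range_succ_eq_map, List.map_cons, List.map_map, hD]
    simp only [Function.comp_def]
    congr 1
    · norm_num
    · have hdiv : ∀ i : Nat, n / 54 ^ (i + 1) = n / 54 / 54 ^ i := by
        intro i
        rw [Nat.div_div_eq_div_mul, pow_succ']
      rcases Nat.eq_zero_or_pos k with rfl | hk
      · have : n / 54 = 0 := Nat.div_eq_of_lt (by simpa using h2)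
        rw [this, pvDLSD]
        simp only [List.range_zero, List.map_nil]
        rfl
      · have hge : 54 ^ k ≤ n := by
          calc (54:Nat) ^ k = 54 ^ (k + 1 - 1) := by norm_num
          _ ≤ n := h3
        have h54 : 54 ≤ n := le_trans (by
            calc (54 : Nat) = 54 ^ 1 := (pow_one 54).symm
            _ ≤ 54 ^ k := Nat.pow_le_pow_right (by norm_num) hk) hge
        have hq1 : 0 < n / 54 := Nat.div_pos h54 (by norm_num)
        have hq2 : n / 54 < 54 ^ k := by
          rw [Nat.div_lt_iff_lt_mul (by norm_num)]
          calc n < 54 ^ (k + 1) := h2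
          _ = 54 ^ k * 54 := by ring
        have hq3 : 54 ^ (k - 1) ≤ n / 54 := by
          rw [Nat.le_div_iff_mul_le (by norm_num)]
          calc 54 ^ (k - 1) * 54 = 54 ^ (k - 1 + 1) := by ring
          _ = 54 ^ k := by congr 1; omega
          _ ≤ n := hge
        calc (List.range k).map (fun i => n / 54 ^ (i + 1) % 54)
            = (List.range k).map (fun i => n / 54 / 54 ^ i % 54) := by
              apply List.map_congr_left; intro i _; rw [hdiv i]
          _ = pvDLSD (n / 54) := ih (n / 54) hq1 hq2 hq3

-- ===== VERDICT (by name: the statement is the Claim_ definition above) =====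
theorem int_to_minified_name_spec : Claim_equal_int_to_minified_name := by
  intro id_ _ hpre
  unfold Spec_int_to_minified_name int_to_minified_name int_to_minified_name_alt
  split_ifs with h0
  · rfl
  · have hpos : 0 < id_ := lt_of_le_of_ne hpre (Ne.symm h0)
    obtain ⟨n, rfl⟩ : ∃ n : Nat, id_ = (n : Int) := ⟨id_.toNat, (Int.toNat_of_nonneg hpre).symm⟩
    have hn : 0 < n := by exact_mod_cast hpos
    -- digit count from the power loop
    have hspec := pvPowLoopB_spec ((n : Int) + 1 - 54 ^ 0).toNat (n : Int) 0 rfl hpos (Or.inl rfl)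
    set K := pvPowLoopB (n : Int) (54 ^ 0) 0 with hK
    have hK' : pvPowLoopB (n : Int) 1 0 = K := by rw [hK]; norm_num
    obtain ⟨hub, hKpos, hlb⟩ := hspec
    have hubN : n < 54 ^ K := by exact_mod_cast (by push_cast at hub ⊢; exact hub : ((n : Int)) < ((54 ^ K : Nat) : Int))
    have hlbN : 54 ^ (K - 1) ≤ n := by exact_mod_cast (by push_cast at hlb ⊢; exact hlb : (((54 ^ (K - 1) : Nat)) : Int) ≤ (n : Int))
    -- A's side
    rw [pvLoopA_eq_dLSD n (n : Int) (Int.toNat_natCast n) (Int.natCast_nonneg n) []]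
    simp only [Int.toNat_natCast]
    -- B's side
    simp only [hK']
    rw [PySem.List.foldl_append_singleton_eq_map]
    have hrev : PySem.List.pyRange ((K : Int) - 1) (-1) (-1)
        = (PySem.List.pyRange 0 (K : Int) 1).reverse := by
      rw [PySem.List.pyRange_neg_one_eq_reverse]; norm_num
    rw [hrev, List.map_reverse]
    simp only [List.nil_append]
    congr 1
    congr 1
    have hrange : PySem.List.pyRange 0 (K : Int) 1 = (List.range K).map (fun i : Nat => (i : Int)) := by
      rw [PySem.List.pyRange_one]
      simp
    rw [hrange, List.map_map, ← pvMSD_eq_dLSD K n hn hubN hlbN, List.map_map]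
    apply List.map_congr_left
    intro i _
    simp only [Function.comp]
    rw [show ((54 : Int) ^ ((i : Int)).toNat) = (((54 ^ i : Nat)) : Int) by push_cast; simp,
      PySem.Int.floordiv_natCast,
      show (PySem.Int.mod ((n / 54 ^ i : Nat) : Int) 54) = ((n / 54 ^ i % 54 : Nat) : Int) by
        rw [show ((54 : Int)) = ((54 : Nat) : Int) by norm_num, PySem.Int.mod_natCast]]
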